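-- pv_equiv track=rewrite | github.com/lukacslacko/rubikml | rubik_beam.py | nice
-- ===== SOURCE A (Python) =====
-- def nice(steps):
--     if len(steps) == 0:
--         return []
--     first = steps[0]
--     count = 1
--     while count < len(steps) and steps[count] == first:
--         count += 1
--     modifier = (
--         "" if count == 1 else "2" if count == 2 else "'" if count == 3 else str(count)
--     )
--     result = [first.upper() + modifier] + nice(steps[count:])
--     return result
-- ===== SOURCE B (Python) =====
-- def _mod(count):
--     return "" if count == 1 else "2" if count == 2 else "'" if count == 3 else str(count)
--
--
-- def nice(steps):
--     if len(steps) == 0: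
--         return []
--     result = []
--     cur = steps[0]
--     count = 1
--     for s in steps[1:]:
--         if s == cur:
--             count += 1
--         else:
--             result.append(cur.upper() + _mod(count))
--             cur = s
--             count = 1
--     result.append(cur.upper() + _mod(count))
--     return result
-- ===== Notes on version B (the rewrite author's own statement) =====
-- stated objective: faster
-- what changed: Replaced recursion with tail slicing (steps[count:] copies the rest of the list at every group) by a single iterative pass that keeps the current run element and its count in local variables and emits each group when the element changes.
import Mathlib
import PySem

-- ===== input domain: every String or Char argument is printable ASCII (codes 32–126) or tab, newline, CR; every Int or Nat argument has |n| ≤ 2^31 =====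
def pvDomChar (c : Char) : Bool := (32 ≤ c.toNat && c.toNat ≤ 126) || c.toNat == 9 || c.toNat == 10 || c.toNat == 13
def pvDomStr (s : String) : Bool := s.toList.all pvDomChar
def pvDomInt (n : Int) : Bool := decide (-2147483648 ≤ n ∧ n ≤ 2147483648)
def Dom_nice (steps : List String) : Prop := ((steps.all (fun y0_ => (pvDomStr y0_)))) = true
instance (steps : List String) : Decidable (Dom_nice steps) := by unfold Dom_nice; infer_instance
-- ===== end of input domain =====

-- B replaces A's recursion with tail slicing by one iterative pass keeping (current element, run count); objective: simpler.

-- ===== PORT A =====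
-- the while loop 'while count < len(steps) and steps[count] == first: count += 1'
-- counts the equal prefix of the tail; count = 1 + niceRun first rest
def niceRun (first : String) : List String → Nat
  | [] => 0
  | s :: rest => if s = first then 1 + niceRun first rest else 0

-- steps[count:] with 1 ≤ count ≤ len(steps) is exactly List.drop count
def nice : List String → List String
  | [] => []
  | first :: rest =>
    let count := 1 + niceRun first rest
    let modifier :=
      if count = 1 then "" else if count = 2 then "2" else if count = 3 then "'"
      else PySem.Int.toStr (count : Int)
    (PySem.Str.upper first ++ modifier) :: nice ((first :: rest).drop count)
termination_by steps => steps.length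
decreasing_by
  simp only [List.length_drop, List.length_cons]
  omega

-- ===== PORT B =====
def niceMod (count : Nat) : String :=
  if count = 1 then "" else if count = 2 then "2" else if count = 3 then "'"
  else PySem.Int.toStr (count : Int)

def nice_alt : List String → List String
  | [] => []
  | first :: rest =>
    let fin := rest.foldl
      (fun (st : List String × String × Nat) s =>
        if s = st.2.1 then (st.1, st.2.1, st.2.2 + 1)
        else (st.1 ++ [PySem.Str.upper st.2.1 ++ niceMod st.2.2], s, 1))
      ([], first, 1)
    fin.1 ++ [PySem.Str.upper fin.2.1 ++ niceMod fin.2.2]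

-- ===== PRECONDITION & SPEC =====
def Spec_nice (steps : List String) (out : List String) : Prop := out = nice_alt steps
instance (steps : List String) (out : List String) : Decidable (Spec_nice steps out) := by unfold Spec_nice; infer_instance

-- ===== CLAIM (what is proved, stated in full; the proofs are below) =====
def Claim_equal_nice : Prop := ∀ (steps : List String), Dom_nice steps → Spec_nice steps (nice steps)

-- ===== LEMMAS AND PROOFS =====

-- reference grouping function: current run element `cur` with pending count `count`
def niceSpec (cur : String) (count : Nat) : List String → List String
  | [] => [PySem.Str.upper cur ++ niceMod count]
  | s :: rest =>
    if s = cur then niceSpec cur (count + 1) rest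
    else (PySem.Str.upper cur ++ niceMod count) :: niceSpec s 1 rest

theorem foldl_eq_niceSpec (rest : List String) :
    ∀ (res : List String) (cur : String) (count : Nat),
      (let fin := rest.foldl
        (fun (st : List String × String × Nat) s =>
          if s = st.2.1 then (st.1, st.2.1, st.2.2 + 1)
          else (st.1 ++ [PySem.Str.upper st.2.1 ++ niceMod st.2.2], s, 1))
        (res, cur, count)
       fin.1 ++ [PySem.Str.upper fin.2.1 ++ niceMod fin.2.2]) = res ++ niceSpec cur count rest := by
  induction rest with
  | nil => intro res cur count; simp [niceSpec]
  | cons s rest ih =>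
    intro res cur count
    by_cases h : s = cur
    · simp [List.foldl_cons, h, niceSpec, ih]
    · simp [List.foldl_cons, h, niceSpec, ih, List.append_assoc]

theorem niceSpec_eq_nice (rest : List String) :
    ∀ (cur : String) (count : Nat),
      niceSpec cur count rest =
        (PySem.Str.upper cur ++ niceMod (count + niceRun cur rest)) ::
          nice (rest.drop (niceRun cur rest)) := by
  induction rest with
  | nil => intro cur count; simp [niceSpec, niceRun, nice]
  | cons s rest ih =>
    intro cur count
    by_cases h : s = cur
    · subst h
      simp only [niceSpec, niceRun, ih, if_true]
      rw [show count + 1 + niceRun s rest = count + (1 + niceRun s rest) from by omega,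
          Nat.add_comm 1 (niceRun s rest), List.drop_succ_cons]
    · simp only [niceSpec, if_neg h, niceRun, Nat.add_zero, List.drop_zero]
      rw [ih s 1]
      simp only [nice, niceMod]
      rw [Nat.add_comm 1 (niceRun s rest), List.drop_succ_cons]

theorem nice_eq_alt (steps : List String) : nice steps = nice_alt steps := by
  cases steps with
  | nil => simp [nice, nice_alt]
  | cons first rest =>
    have hfold := foldl_eq_niceSpec rest [] first 1
    simp only [List.nil_append] at hfold
    simp only [nice_alt, hfold, niceSpec_eq_nice rest first 1, Nat.add_comm 1]
    simp only [nice, niceMod, List.drop_succ_cons, Nat.add_comm 1]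

-- ===== VERDICT (by name: the statement is the Claim_ definition above) =====
theorem nice_spec : Claim_equal_nice := by
  intro steps _
  unfold Spec_nice
  exact nice_eq_alt steps
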